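-- pv_equiv track=rewrite | github.com/SanaaWeee2006/MainFlow-Task-1 | MainFlowTask-1(CustomEncryption-DecryptionSystem).py | matrix_transform_decrypt
-- ===== SOURCE A (Python) =====
-- def matrix_transform_decrypt(encrypted_message):
--     decrypted = ""
--     for i in range(0, len(encrypted_message), 2):
--         if i + 1 < len(encrypted_message):
--             decrypted += encrypted_message[i + 1] + encrypted_message[i]
--         else:
--             decrypted += encrypted_message[i]
--     return decrypted
-- ===== SOURCE B (Python) =====
-- def matrix_transform_decrypt(encrypted_message):
--     evens = encrypted_message[0::2]
--     odds = encrypted_message[1::2]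
--     pieces = [o + e for e, o in zip(evens, odds)]
--     if len(evens) > len(odds):
--         pieces.append(evens[-1])
--     return ''.join(pieces)
-- ===== Notes on version B (the rewrite author's own statement) =====
-- stated objective: alternative
-- what changed: Replaces the index loop with a stride decomposition: slice the even- and odd-position characters, zip them and emit each pair swapped, appending the leftover even character for odd length.
import Mathlib
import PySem

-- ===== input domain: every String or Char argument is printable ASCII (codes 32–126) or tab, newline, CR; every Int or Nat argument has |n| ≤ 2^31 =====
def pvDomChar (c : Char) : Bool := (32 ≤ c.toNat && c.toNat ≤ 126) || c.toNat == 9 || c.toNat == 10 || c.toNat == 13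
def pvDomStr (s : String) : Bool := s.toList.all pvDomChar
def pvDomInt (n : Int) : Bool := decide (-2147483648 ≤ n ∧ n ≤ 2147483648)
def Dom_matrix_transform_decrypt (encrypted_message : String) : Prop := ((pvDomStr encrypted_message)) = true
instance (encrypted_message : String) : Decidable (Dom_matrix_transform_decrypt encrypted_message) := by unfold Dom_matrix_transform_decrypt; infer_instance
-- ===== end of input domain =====

-- B swaps adjacent pairs via a stride decomposition (even/odd slices zipped) instead of A's
-- index loop over range(0, len, 2); same cost, different decomposition (objective: alternative).

-- ===== PORT A =====
-- for i in range(0, len, 2): decrypted += s[i+1] + s[i]  (or s[i] for the leftover); indices are in range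
def matrix_transform_decrypt (encrypted_message : String) : String :=
  let cs := encrypted_message.toList
  let out := (PySem.List.pyRange 0 (cs.length : Int) 2).foldl
    (fun acc i =>
      if i + 1 < (cs.length : Int) then
        acc ++ [PySem.List.pyGetD cs (i + 1) ' ', PySem.List.pyGetD cs i ' ']
      else
        acc ++ [PySem.List.pyGetD cs i ' ']) []
  String.mk out

-- ===== PORT B =====
-- evens = s[0::2]; odds = s[1::2]; pieces = [o+e for e,o in zip]; leftover even; ''.join
def matrix_transform_decrypt_alt (encrypted_message : String) : String :=
  let cs := encrypted_message.toList
  let evens := (PySem.List.slice? cs (some 0) none 2).getD []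
  let odds := (PySem.List.slice? cs (some 1) none 2).getD []
  let pieces := (evens.zip odds).map (fun p => [p.2, p.1])
  let pieces := if evens.length > odds.length then pieces ++ [[PySem.List.pyGetD evens (-1) ' ']] else pieces
  String.mk pieces.flatten

-- ===== PRECONDITION & SPEC =====
def Spec_matrix_transform_decrypt (encrypted_message : String) (out : String) : Prop := out = matrix_transform_decrypt_alt encrypted_message
instance (encrypted_message : String) (out : String) : Decidable (Spec_matrix_transform_decrypt encrypted_message out) := by unfold Spec_matrix_transform_decrypt; infer_instance

-- ===== CLAIM (what is proved, stated in full; the proofs are below) =====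
def Claim_equal_matrix_transform_decrypt : Prop := ∀ (encrypted_message : String), Dom_matrix_transform_decrypt encrypted_message → Spec_matrix_transform_decrypt encrypted_message (matrix_transform_decrypt encrypted_message)

-- ===== LEMMAS AND PROOFS =====

/-- Characters at even positions. -/
def pvEv {α : Type} : List α → List α
  | [] => []
  | [a] => [a]
  | a :: _ :: t => a :: pvEv t

/-- The common value: adjacent pairs swapped, leftover kept. -/
def pvSwap {α : Type} : List α → List α
  | [] => []
  | [a] => [a]
  | a :: b :: t => b :: a :: pvSwap t

theorem pvEv_cons_tail {α : Type} (x : α) (xs : List α) : pvEv (x :: xs) = x :: pvEv xs.tail := by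
  cases xs <;> simp [pvEv]

theorem pvStrideGet {α : Type} (xs : List α) :
    List.filterMap (fun k => xs[2 * k]?) (List.range ((xs.length + 1) / 2)) = pvEv xs := by
  induction xs using pvEv.induct with
  | case1 => simp [pvEv]
  | case2 a => simp [pvEv]
  | case3 a b t ih =>
    have hm : ((a :: b :: t).length + 1) / 2 = (t.length + 1) / 2 + 1 := by simp; omega
    rw [hm, List.range_succ_eq_map, List.filterMap_cons, List.filterMap_map]
    have hf : (fun k => (a :: b :: t)[2 * k]?) ∘ Nat.succ = fun k => t[2 * k]? := by
      funext k
      have : 2 * Nat.succ k = 2 * k + 1 + 1 := by omega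
      simp [this]
    simp only [hf, ih]
    simp [pvEv]

theorem pvSlice0 {α : Type} (xs : List α) :
    PySem.List.slice? xs (some 0) none 2 = some (pvEv xs) := by
  unfold PySem.List.slice? PySem.List.sliceIndices
  norm_num
  have hc : (if 0 < xs.length then (((xs.length : Int) + 2 - 1) / 2).toNat else 0)
      = (xs.length + 1) / 2 := by
    split <;> omega
  rw [hc]
  have hf : (fun k : Nat => xs[(2 * (k : Int)).toNat]?) = fun k => xs[2 * k]? := by
    funext k
    have : (2 * (k : Int)).toNat = 2 * k := by omega
    rw [this]
  rw [hf, pvStrideGet]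

theorem pvSlice1 {α : Type} (xs : List α) :
    PySem.List.slice? xs (some 1) none 2 = some (pvEv xs.tail) := by
  cases xs with
  | nil => simp [PySem.List.slice?, PySem.List.sliceIndices, pvEv]
  | cons a t =>
    unfold PySem.List.slice? PySem.List.sliceIndices
    norm_num
    have hc : (if 0 < t.length then (((t.length : Int) + 2 - 1) / 2).toNat else 0)
        = (t.length + 1) / 2 := by
      split <;> omega
    rw [hc]
    have hf : (fun k : Nat => (a :: t)[((1:Int) + 2 * (k : Int)).toNat]?) = fun k => t[2 * k]? := by
      funext k
      have : ((1:Int) + 2 * (k : Int)).toNat = 2 * k + 1 := by omega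
      simp [this]
    rw [hf, pvStrideGet]

-- B's core equals pvSwap
theorem pvB_core {α : Type} (d : α) (xs : List α) :
    (let evens := pvEv xs
     let odds := pvEv xs.tail
     let pieces := (evens.zip odds).map (fun p => [p.2, p.1])
     let pieces := if evens.length > odds.length then pieces ++ [[PySem.List.pyGetD evens (-1) d]] else pieces
     pieces.flatten) = pvSwap xs := by
  induction xs using pvSwap.induct with
  | case1 => simp [pvEv, pvSwap]
  | case2 a => simp [pvEv, pvSwap, PySem.List.pyGetD, PySem.List.pyGet?, PySem.List.pyIdx?]
  | case3 a b t ih =>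
    simp only at ih ⊢
    have h2 : pvEv (b :: t) = b :: pvEv t.tail := pvEv_cons_tail b t
    simp only [List.tail_cons, h2, pvEv, List.zip_cons_cons, List.map_cons, List.length_cons,
      gt_iff_lt, Nat.add_lt_add_iff_right]
    by_cases h : (pvEv t.tail).length < (pvEv t).length
    · have hne : pvEv t ≠ [] := by intro he; rw [he] at h; simp at h
      rw [if_pos h] at ih ⊢
      have hg : PySem.List.pyGetD (a :: pvEv t) (-1) d = PySem.List.pyGetD (pvEv t) (-1) d := by
        simp [PySem.List.pyGetD, PySem.List.pyGet?, PySem.List.pyIdx?]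
        rcases List.exists_cons_of_ne_nil hne with ⟨y, ys, hys⟩
        rw [hys]
        simp
        rfl
      rw [hg]
      simp only [List.flatten_cons, List.cons_append]
      rw [ih]
      simp [pvSwap]
    · rw [if_neg h] at ih ⊢
      simp only [List.flatten_cons, List.cons_append]
      rw [ih]
      simp [pvSwap]

theorem pvRange2 (n : Nat) :
    PySem.List.pyRange 0 (n : Int) 2 = (List.range ((n + 1) / 2)).map (fun k : Nat => ((2 * k : Nat) : Int)) := by
  unfold PySem.List.pyRange
  norm_num
  have hc : (if 0 < n then (((n : Int) + 2 - 1) / 2).toNat else 0) = (n + 1) / 2 := by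
    split <;> omega
  rw [hc]

theorem pvA_core (cs : List Char) (init : List Char) :
    ((List.range ((cs.length + 1) / 2)).map (fun k : Nat => ((2 * k : Nat) : Int))).foldl
      (fun acc i =>
        if i + 1 < (cs.length : Int) then
          acc ++ [PySem.List.pyGetD cs (i + 1) ' ', PySem.List.pyGetD cs i ' ']
        else
          acc ++ [PySem.List.pyGetD cs i ' ']) init = init ++ pvSwap cs := by
  induction cs using pvSwap.induct generalizing init with
  | case1 => simp [pvSwap]
  | case2 a =>
    simp [pvSwap, PySem.List.pyGetD, PySem.List.pyGet?, PySem.List.pyIdx?]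
  | case3 a b t ih =>
    have hm : ((a :: b :: t).length + 1) / 2 = (t.length + 1) / 2 + 1 := by simp; omega
    rw [hm, List.range_succ_eq_map, List.map_cons, List.foldl_cons, List.map_map]
    have hcomp : ((fun k : Nat => ((2 * k : Nat) : Int)) ∘ Nat.succ)
        = fun k : Nat => ((2 * k + 2 : Nat) : Int) := by
      funext k
      simp [Function.comp, Nat.succ_eq_add_one, Nat.mul_add]
    rw [hcomp]
    simp only [Nat.mul_zero, Nat.cast_zero]
    have hlt : (0 : Int) + 1 < ((a :: b :: t).length : Int) := by simp
    rw [if_pos hlt]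
    have g1 : PySem.List.pyGetD (a :: b :: t) ((0 : Int) + 1) ' ' = b := by
      rw [show ((0 : Int) + 1) = ((1 : Nat) : Int) by norm_num, PySem.List.pyGetD_natCast]
      rfl
    have g0 : PySem.List.pyGetD (a :: b :: t) (0 : Int) ' ' = a := by
      rw [show (0 : Int) = ((0 : Nat) : Int) by norm_num, PySem.List.pyGetD_natCast]
      rfl
    rw [g1, g0]
    have hshift : (fun (acc : List Char) (k : Nat) =>
          (fun acc (i : Int) =>
            if i + 1 < ((a :: b :: t).length : Int) then
              acc ++ [PySem.List.pyGetD (a :: b :: t) (i + 1) ' ', PySem.List.pyGetD (a :: b :: t) i ' ']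
            else acc ++ [PySem.List.pyGetD (a :: b :: t) i ' ']) acc ((2 * k + 2 : Nat) : Int))
        = (fun (acc : List Char) (k : Nat) =>
          (fun acc (i : Int) =>
            if i + 1 < (t.length : Int) then
              acc ++ [PySem.List.pyGetD t (i + 1) ' ', PySem.List.pyGetD t i ' ']
            else acc ++ [PySem.List.pyGetD t i ' ']) acc ((2 * k : Nat) : Int)) := by
      funext acc k
      simp only
      have hcond : (((2 * k + 2 : Nat) : Int) + 1 < ((a :: b :: t).length : Int)) ↔
          (((2 * k : Nat) : Int) + 1 < (t.length : Int)) := by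
        simp only [List.length_cons]
        push_cast
        omega
      have hg1 : PySem.List.pyGetD (a :: b :: t) (((2 * k + 2 : Nat) : Int) + 1) ' '
          = PySem.List.pyGetD t (((2 * k : Nat) : Int) + 1) ' ' := by
        rw [show (((2 * k + 2 : Nat) : Int) + 1) = ((2 * k + 3 : Nat) : Int) by push_cast; ring,
            show (((2 * k : Nat) : Int) + 1) = ((2 * k + 1 : Nat) : Int) by push_cast; ring,
            PySem.List.pyGetD_natCast, PySem.List.pyGetD_natCast]
        rw [show 2 * k + 3 = 2 * k + 1 + 1 + 1 by ring]
        rfl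
      have hg0 : PySem.List.pyGetD (a :: b :: t) ((2 * k + 2 : Nat) : Int) ' '
          = PySem.List.pyGetD t ((2 * k : Nat) : Int) ' ' := by
        rw [PySem.List.pyGetD_natCast, PySem.List.pyGetD_natCast]
        rw [show 2 * k + 2 = 2 * k + 1 + 1 by ring]
        rfl
      rw [hg1, hg0]
      by_cases h : ((2 * k : Nat) : Int) + 1 < (t.length : Int)
      · rw [if_pos (hcond.mpr h), if_pos h]
      · rw [if_neg (fun hh => h (hcond.mp hh)), if_neg h]
    have ih' := ih ((init ++ [b, a] : List Char))
    rw [List.foldl_map] at ih'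
    rw [List.foldl_map, hshift]
    rw [ih']
    simp [pvSwap]

theorem pvA_eq (s : String) : matrix_transform_decrypt s = String.mk (pvSwap s.toList) := by
  unfold matrix_transform_decrypt
  simp only
  rw [pvRange2, pvA_core]
  simp

theorem pvB_eq (s : String) : matrix_transform_decrypt_alt s = String.mk (pvSwap s.toList) := by
  unfold matrix_transform_decrypt_alt
  simp only [pvSlice0, pvSlice1, Option.getD_some]
  rw [← pvB_core ' ' s.toList]

-- ===== VERDICT (by name: the statement is the Claim_ definition above) =====
theorem matrix_transform_decrypt_spec : Claim_equal_matrix_transform_decrypt := by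
  intro s _
  unfold Spec_matrix_transform_decrypt
  rw [pvA_eq, pvB_eq]
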